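-- pv_equiv track=rewrite | github.com/strivn/samantha-bot-line | chatbot/utils.py | compose_help_message
-- ===== SOURCE A (Python) =====
-- def compose_help_message(commands, authenticated):
--     '''
--     Compose the help message
--     '''
--
--     content = ''.join(['\n  • ?{} '.format(command[0]) for command in commands if command[1] == 1])
--
--     if authenticated:
--         content += '\n\nDan ini beberapa perintah khusus untuk fungsionaris:'
--         content += ''.join(['\n  • ?{} '.format(command[0]) for command in commands if command[1] == 2])
--
--     reply = "Halo! \nAku bisa bantu kru sekalian dengan beberapa perintah, diantaranya: " + content + \
--             "\n\nKalau masih bingung perintahnya untuk apa, coba ketik ?Help dan nama perintahnya, \nmisal: ?Help Agenda "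
--
--     return reply
-- ===== SOURCE B (Python) =====
-- def compose_help_message(commands, authenticated):
--     '''
--     Compose the help message
--     '''
--     def parts(rest):
--         # structural recursion: build both bullet sections back-to-front,
--         # directly as strings (no intermediate lists, no join)
--         if not rest:
--             return ('', '')
--         s1, s2 = parts(rest[1:])
--         name, kind = rest[0]
--         bullet = '\n  • ?{} '.format(name)
--         if kind == 1:
--             return (bullet + s1, s2)
--         if kind == 2:
--             return (s1, bullet + s2)
--         return (s1, s2)
--
--     s1, s2 = parts(commands)
--     content = s1
--     if authenticated:
--         content += '\n\nDan ini beberapa perintah khusus untuk fungsionaris:' + s2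
--     return ("Halo! \nAku bisa bantu kru sekalian dengan beberapa perintah, diantaranya: " + content +
--             "\n\nKalau masih bingung perintahnya untuk apa, coba ketik ?Help dan nama perintahnya, \nmisal: ?Help Agenda ")
-- ===== Notes on version B (the rewrite author's own statement) =====
-- stated objective: alternative
-- what changed: Replaces A's two filtering comprehensions plus ''.join with one structural recursion over the list that builds both bullet sections back-to-front as strings in a single pass, with no intermediate lists and no join.
import Mathlib
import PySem

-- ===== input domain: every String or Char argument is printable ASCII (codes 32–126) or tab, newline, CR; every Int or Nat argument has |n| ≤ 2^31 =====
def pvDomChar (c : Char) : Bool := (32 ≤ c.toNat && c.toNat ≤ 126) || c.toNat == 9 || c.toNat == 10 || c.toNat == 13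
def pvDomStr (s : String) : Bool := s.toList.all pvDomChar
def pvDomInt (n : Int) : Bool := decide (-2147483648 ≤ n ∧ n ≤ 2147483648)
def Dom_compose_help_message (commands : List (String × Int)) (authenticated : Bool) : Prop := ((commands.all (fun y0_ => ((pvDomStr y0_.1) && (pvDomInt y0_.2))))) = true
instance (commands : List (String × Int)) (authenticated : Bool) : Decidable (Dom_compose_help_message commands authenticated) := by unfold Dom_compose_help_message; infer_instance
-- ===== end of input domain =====

-- B replaces A's two filtering comprehensions + join by one structural recursion building both
-- bullet sections back-to-front as strings; objective: alternative (not claimed faster).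

-- ===== PORT A =====
-- '\n  • ?{} '.format(x)
def pvFmt (x : String) : String := "\n  • ?" ++ x ++ " "

def compose_help_message (commands : List (String × Int)) (authenticated : Bool) : String :=
  let content := String.join ((commands.filter (fun c => c.2 == 1)).map (fun c => pvFmt c.1))
  let content := if authenticated then
      content ++ "\n\nDan ini beberapa perintah khusus untuk fungsionaris:"
        ++ String.join ((commands.filter (fun c => c.2 == 2)).map (fun c => pvFmt c.1))
    else content
  "Halo! \nAku bisa bantu kru sekalian dengan beberapa perintah, diantaranya: " ++ content ++
    "\n\nKalau masih bingung perintahnya untuk apa, coba ketik ?Help dan nama perintahnya, \nmisal: ?Help Agenda "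

-- ===== PORT B =====
-- Source B's 'parts': recursion over the list, prepending each bullet to the matching section
def pvParts : List (String × Int) → String × String
  | [] => ("", "")
  | c :: rest =>
    let p := pvParts rest
    if c.2 == 1 then (pvFmt c.1 ++ p.1, p.2)
    else if c.2 == 2 then (p.1, pvFmt c.1 ++ p.2)
    else p

def compose_help_message_alt (commands : List (String × Int)) (authenticated : Bool) : String :=
  let p := pvParts commands
  let content := p.1
  let content := if authenticated then
      content ++ ("\n\nDan ini beberapa perintah khusus untuk fungsionaris:" ++ p.2)
    else content
  "Halo! \nAku bisa bantu kru sekalian dengan beberapa perintah, diantaranya: " ++ content ++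
    "\n\nKalau masih bingung perintahnya untuk apa, coba ketik ?Help dan nama perintahnya, \nmisal: ?Help Agenda "

-- ===== PRECONDITION & SPEC =====
def Spec_compose_help_message (commands : List (String × Int)) (authenticated : Bool) (out : String) : Prop := out = compose_help_message_alt commands authenticated
instance (commands : List (String × Int)) (authenticated : Bool) (out : String) : Decidable (Spec_compose_help_message commands authenticated out) := by unfold Spec_compose_help_message; infer_instance

-- ===== CLAIM (what is proved, stated in full; the proofs are below) =====
def Claim_equal_compose_help_message : Prop := ∀ (commands : List (String × Int)) (authenticated : Bool), Dom_compose_help_message commands authenticated → Spec_compose_help_message commands authenticated (compose_help_message commands authenticated)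

-- ===== LEMMAS AND PROOFS =====
theorem pvFoldl_append_shift (l : List String) (s : String) :
    List.foldl (fun r t => r ++ t) s l = s ++ List.foldl (fun r t => r ++ t) "" l := by
  induction l generalizing s with
  | nil => simp
  | cons a l ih => simp only [List.foldl_cons]; rw [ih (s ++ a), ih ("" ++ a)]; simp [String.append_assoc]

theorem pvJoin_cons (a : String) (l : List String) :
    String.join (a :: l) = a ++ String.join l := by
  simp only [String.join, List.foldl_cons]
  rw [pvFoldl_append_shift]; simp

theorem pvParts_eq (commands : List (String × Int)) :
    pvParts commands
    = (String.join ((commands.filter (fun c => c.2 == 1)).map (fun c => pvFmt c.1)),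
       String.join ((commands.filter (fun c => c.2 == 2)).map (fun c => pvFmt c.1))) := by
  induction commands with
  | nil => simp [pvParts, String.join]
  | cons c cs ih =>
    simp only [pvParts, ih, List.filter_cons]
    by_cases h1 : c.2 = 1
    · simp [h1, pvJoin_cons]
    · by_cases h2 : c.2 = 2
      · simp [h2, pvJoin_cons]
      · simp [h1, h2]

-- ===== VERDICT (by name: the statement is the Claim_ definition above) =====
theorem compose_help_message_spec : Claim_equal_compose_help_message := by
  intro commands authenticated _
  unfold Spec_compose_help_message compose_help_message compose_help_message_alt
  rw [pvParts_eq]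
  simp [String.append_assoc]
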